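-- pv_equiv track=rewrite | github.com/sasakama-code/sphinxcontrib-jsontable | sphinxcontrib/jsontable/excel_data_loader.py | _detect_column_bounds
-- ===== SOURCE A (Python) =====
-- def _detect_column_bounds(
--     data: list[list[str]], start_row: int, end_row: int
-- ) -> tuple[int, int]:
--     """指定行範囲内での列境界を検出。
--
--     Args:
--         data: Excelデータ
--         start_row: 開始行(0ベース)
--         end_row: 終了行(0ベース、含む)
--
--     Returns:
--         tuple[int, int]: (最小列番号, 最大列番号) 0ベース
--
--     Raises:
--         ValueError: 無効な行範囲の場合
--     """
--     if not data:
--         return 0, 0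
--
--     if start_row < 0 or end_row >= len(data) or start_row > end_row:
--         # 無効な範囲の場合はデフォルト値を返す
--         return 0, 0
--
--     min_col = float("inf")
--     max_col = -1
--
--     for row_idx in range(start_row, end_row + 1):
--         if row_idx < len(data):
--             row = data[row_idx]
--             # 空でないセルの範囲を検出
--             for col_idx, cell in enumerate(row):
--                 if cell is not None and str(cell).strip():
--                     min_col = min(min_col, col_idx)
--                     max_col = max(max_col, col_idx)
--
--     # データが見つからない場合
--     if min_col == float("inf"):
--         return 0, 0
--
--     return int(min_col), max_col
-- ===== SOURCE B (Python) =====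
-- def _detect_column_bounds(data, start_row, end_row):
--     if not data:
--         return 0, 0
--     if start_row < 0 or end_row >= len(data) or start_row > end_row:
--         return 0, 0
--     min_col = None
--     max_col = -1
--     for row in data[start_row:end_row + 1]:
--         # first non-empty cell: scan left-to-right, break at the first hit
--         first = None
--         k = 0
--         for cell in row:
--             if cell is not None and str(cell).strip():
--                 first = k
--                 break
--             k += 1
--         if first is None:
--             continue  # empty row: contributes nothing
--         # last non-empty cell: scan right-to-left, break at the first hit
--         n = len(row)
--         last = None
--         k = 0
--         for cell in reversed(row):
--             if cell is not None and str(cell).strip():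
--                 last = n - 1 - k
--                 break
--             k += 1
--         if last is None:
--             last = first
--         if min_col is None or first < min_col:
--             min_col = first
--         if max_col < last:
--             max_col = last
--     if min_col is None:
--         return 0, 0
--     return int(min_col), max_col
-- ===== Notes on version B (the rewrite author's own statement) =====
-- stated objective: alternative
-- what changed: A updates a running min/max at every non-empty cell of every row; B decomposes per row, breaking out at the first non-empty cell from the left (row first) and from the right (row last), skipping empty rows, and folds only these per-row bounds into the global min/max.
import Mathlib
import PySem

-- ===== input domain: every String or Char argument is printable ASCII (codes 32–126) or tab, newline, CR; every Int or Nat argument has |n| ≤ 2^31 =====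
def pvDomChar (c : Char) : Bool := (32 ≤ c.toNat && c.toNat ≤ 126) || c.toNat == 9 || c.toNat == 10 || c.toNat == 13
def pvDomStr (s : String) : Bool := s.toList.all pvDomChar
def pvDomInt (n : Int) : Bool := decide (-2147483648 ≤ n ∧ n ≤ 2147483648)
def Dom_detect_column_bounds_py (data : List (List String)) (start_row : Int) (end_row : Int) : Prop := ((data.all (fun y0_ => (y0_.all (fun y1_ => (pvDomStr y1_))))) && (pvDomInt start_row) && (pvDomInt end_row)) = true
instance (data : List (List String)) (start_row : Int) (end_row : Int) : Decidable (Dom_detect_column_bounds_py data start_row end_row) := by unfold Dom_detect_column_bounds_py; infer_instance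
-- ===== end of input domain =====

-- B replaces A's per-cell running min/max over every cell of every row by a per-row
-- first/last non-empty scan with early break from each end (objective: alternative decomposition).

-- shared non-empty predicate: Python's `cell is not None and str(cell).strip()` on a str cell
def pvTruthy (c : String) : Bool := PySem.Str.len (PySem.Str.strip c) != 0

-- ===== PORT A =====
-- min(min_col, col_idx) where min_col may be float('inf') (modeled as none)
def pvMinO (mn : Option Int) (i : Int) : Option Int :=
  match mn with
  | none => some i
  | some m => some (min m i)

-- A's inner loop: for col_idx, cell in enumerate(row): if non-empty: update (min_col, max_col)
def pvInnerA (row : List String) (s : Int) (st : Option Int × Int) : Option Int × Int :=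
  (PySem.List.enumerate row s).foldl
    (fun st p => if pvTruthy p.2 then (pvMinO st.1 p.1, max st.2 p.1) else st) st

def detect_column_bounds_py (data : List (List String)) (start_row : Int) (end_row : Int) : Int × Int :=
  if data = [] then (0, 0)
  else if start_row < 0 || end_row ≥ (data.length : Int) || start_row > end_row then (0, 0)
  else
    let st := (PySem.List.pyRange start_row (end_row + 1) 1).foldl
      (fun st row_idx =>
        if row_idx < (data.length : Int) then
          pvInnerA (PySem.List.pyGetD data row_idx []) 0 st
        else st)
      ((none : Option Int), (-1 : Int))
    match st.1 with
    | none => (0, 0)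
    | some m => (m, st.2)

-- ===== PORT B =====
-- Source B's left-to-right scan with break: first non-empty index, counter k
def pvFirstAux (cells : List String) (k : Int) : Option Int :=
  match cells with
  | [] => none
  | c :: rest => if pvTruthy c then some k else pvFirstAux rest (k + 1)

-- Source B's right-to-left scan with break over reversed(row): last = n - 1 - k
def pvLastAux (cells : List String) (n : Int) (k : Int) : Option Int :=
  match cells with
  | [] => none
  | c :: rest => if pvTruthy c then some (n - 1 - k) else pvLastAux rest n (k + 1)

-- Source B's per-row body
def pvRowStep (st : Option Int × Int) (row : List String) : Option Int × Int :=
  match pvFirstAux row 0 with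
  | none => st
  | some f =>
    let last := (pvLastAux row.reverse (row.length : Int) 0).getD f
    (match st.1 with
     | none => some f
     | some m => if f < m then some f else some m,
     if st.2 < last then last else st.2)

def detect_column_bounds_py_alt (data : List (List String)) (start_row : Int) (end_row : Int) : Int × Int :=
  if data = [] then (0, 0)
  else if start_row < 0 || end_row ≥ (data.length : Int) || start_row > end_row then (0, 0)
  else
    let st := (PySem.List.slice data (some start_row) (some (end_row + 1))).foldl
      pvRowStep ((none : Option Int), (-1 : Int))
    match st.1 with
    | none => (0, 0)
    | some m => (m, st.2)

-- ===== PRECONDITION & SPEC =====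
def Spec_detect_column_bounds_py (data : List (List String)) (start_row : Int) (end_row : Int) (out : Int × Int) : Prop := out = detect_column_bounds_py_alt data start_row end_row
instance (data : List (List String)) (start_row : Int) (end_row : Int) (out : Int × Int) : Decidable (Spec_detect_column_bounds_py data start_row end_row out) := by unfold Spec_detect_column_bounds_py; infer_instance

-- ===== CLAIM (what is proved, stated in full; the proofs are below) =====
def Claim_equal_detect_column_bounds_py : Prop := ∀ (data : List (List String)) (start_row : Int) (end_row : Int), Dom_detect_column_bounds_py data start_row end_row → Spec_detect_column_bounds_py data start_row end_row (detect_column_bounds_py data start_row end_row)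

-- ===== LEMMAS AND PROOFS =====

-- index of the first / last truthy cell of a row (proof-only characterizations)
def pvFstN : List String → Option Nat
  | [] => none
  | c :: rest => if pvTruthy c then some 0 else (pvFstN rest).map (· + 1)

def pvLstN : List String → Option Nat
  | [] => none
  | c :: rest =>
    match pvLstN rest with
    | some k => some (k + 1)
    | none => if pvTruthy c then some 0 else none

theorem pvFstN_none_iff (row : List String) : pvFstN row = none ↔ pvLstN row = none := by
  induction row with
  | nil => simp [pvFstN, pvLstN]
  | cons c rest ih =>
    simp only [pvFstN, pvLstN]
    cases h : pvLstN rest with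
    | none =>
      have h' : pvFstN rest = none := (ih).2 h
      cases hc : pvTruthy c <;> simp [h']
    | some k =>
      have h' : pvFstN rest ≠ none := fun hn => by rw [ih.1 hn] at h; cases h
      cases hf : pvFstN rest with
      | none => exact absurd hf h'
      | some f => cases hc : pvTruthy c <;> simp
theorem pvFirstAux_eq (row : List String) : ∀ (k : Int),
    pvFirstAux row k = Option.map (fun f : Nat => k + (f : Int)) (pvFstN row) := by
  induction row with
  | nil => intro k; simp [pvFirstAux, pvFstN]
  | cons c rest ih =>
    intro k
    simp only [pvFirstAux, pvFstN]
    cases hc : pvTruthy c with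
    | true => simp
    | false =>
      simp only [Bool.false_eq_true, if_false]
      rw [ih]
      cases pvFstN rest with
      | none => simp
      | some f => simp; omega

theorem pvLstN_append_singleton (ys : List String) (c : String) :
    pvLstN (ys ++ [c]) = if pvTruthy c then some ys.length else pvLstN ys := by
  induction ys with
  | nil => cases hc : pvTruthy c <;> simp [pvLstN, hc]
  | cons y ys ih =>
    simp only [List.cons_append, pvLstN, ih]
    cases hc : pvTruthy c with
    | true => simp
    | false =>
      simp only [Bool.false_eq_true, if_false]
theorem pvLastAux_reverse (xs : List String) : ∀ (k : Int),
    pvLastAux xs.reverse (k + (xs.length : Int)) k = Option.map (fun l : Nat => (l : Int)) (pvLstN xs) := by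
  induction xs using List.reverseRecOn with
  | nil => intro k; simp [pvLastAux, pvLstN]
  | append_singleton ys c ih =>
    intro k
    rw [List.reverse_append]
    simp only [List.reverse_singleton, List.singleton_append, pvLastAux,
      pvLstN_append_singleton]
    cases hc : pvTruthy c with
    | true =>
      simp only [if_true]
      simp
      omega
    | false =>
      simp only [Bool.false_eq_true, if_false]
      have h3 : k + ((ys ++ [c]).length : Int) = (k + 1) + (ys.length : Int) := by
        simp
        omega
      rw [h3]
      exact ih (k + 1)
theorem pvInnerA_eq (row : List String) : ∀ (s : Int) (st : Option Int × Int),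
    pvInnerA row s st =
      match pvFstN row, pvLstN row with
      | some f, some l => (pvMinO st.1 (s + (f : Int)), max st.2 (s + (l : Int)))
      | _, _ => st := by
  induction row with
  | nil => intro s st; simp [pvInnerA, pvFstN, pvLstN, PySem.List.enumerate]
  | cons c rest ih =>
    intro s st
    have hstep : pvInnerA (c :: rest) s st =
        pvInnerA rest (s + 1)
          (if pvTruthy c then (pvMinO st.1 s, max st.2 s) else st) := by
      simp [pvInnerA, PySem.List.enumerate_cons]
    rw [hstep, ih]
    cases hc : pvTruthy c with
    | true =>
      simp only [if_true]
      cases hf : pvFstN rest with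
      | none =>
        have hl : pvLstN rest = none := (pvFstN_none_iff rest).1 hf
        simp only [pvFstN, pvLstN, hf, hl, hc, if_true]
        simp
      | some f =>
        cases hl : pvLstN rest with
        | none =>
          have h' := (pvFstN_none_iff rest).2 hl
          simp [h'] at hf
        | some l =>
          simp only [pvFstN, pvLstN, hf, hl, hc, if_true]
          have e1 : pvMinO (pvMinO st.1 s) (s + 1 + (f : Int)) = pvMinO st.1 (s + ((0 : Nat) : Int)) := by
            cases st.1 <;> simp [pvMinO] <;> omega
          have e2 : max (max st.2 s) (s + 1 + (l : Int)) = max st.2 (s + ((l + 1 : Nat) : Int)) := by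
            push_cast; omega
          rw [e1, e2]
    | false =>
      simp only [Bool.false_eq_true, if_false]
      cases hf : pvFstN rest with
      | none =>
        have hl : pvLstN rest = none := (pvFstN_none_iff rest).1 hf
        simp [pvFstN, pvLstN, hf, hl, hc]
      | some f =>
        cases hl : pvLstN rest with
        | none =>
          have h' := (pvFstN_none_iff rest).2 hl
          simp [h'] at hf
        | some l =>
          simp only [pvFstN, pvLstN, hf, hl, hc, Bool.false_eq_true, if_false]
          simp only [Option.map_some]
          have e1 : s + 1 + (f : Int) = s + ((f + 1 : Nat) : Int) := by push_cast; ring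
          have e2 : s + 1 + (l : Int) = s + ((l + 1 : Nat) : Int) := by push_cast; ring
          rw [e1, e2]
theorem pvRowStep_eq_innerA (st : Option Int × Int) (row : List String) :
    pvRowStep st row = pvInnerA row 0 st := by
  rw [pvInnerA_eq]
  unfold pvRowStep
  rw [pvFirstAux_eq]
  cases hf : pvFstN row with
  | none => simp
  | some f =>
    cases hl : pvLstN row with
    | none =>
      have h' := (pvFstN_none_iff row).2 hl
      simp [h'] at hf
    | some l =>
      have hlast : pvLastAux row.reverse ((row.length : Int)) 0 = some (l : Int) := by
        have h0 := pvLastAux_reverse row 0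
        rw [hl] at h0
        simpa using h0
      simp only [hlast, Option.map_some, Option.getD_some]
      rw [Prod.mk.injEq]
      refine ⟨?_, ?_⟩
      · cases st.1 with
        | none => rfl
        | some m =>
          simp only [pvMinO]
          split <;> (simp only [Option.some.injEq]; omega)
      · rw [max_def]
        split_ifs <;> omega
theorem pv_outer (data : List (List String)) (n : Nat) : ∀ (a b : Int) (st : Option Int × Int),
    (b - a).toNat = n → 0 ≤ a → 0 ≤ b → b ≤ (data.length : Int) →
    (PySem.List.pyRange a b 1).foldl
      (fun st row_idx =>
        if row_idx < (data.length : Int) then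
          pvInnerA (PySem.List.pyGetD data row_idx []) 0 st
        else st) st
    = (PySem.List.slice data (some a) (some b)).foldl (fun st row => pvInnerA row 0 st) st := by
  induction n with
  | zero =>
    intro a b st hn ha hb hlen
    have hba : b ≤ a := by omega
    rw [PySem.List.pyRange_one_eq_nil hba, PySem.List.slice_toNat data ha hb]
    have : (b.toNat - a.toNat) = 0 := by omega
    simp [this]
  | succ n ih =>
    intro a b st hn ha hb hlen
    have hab : a < b := by omega
    have halen : a.toNat < data.length := by omega
    rw [PySem.List.pyRange_one_cons hab, PySem.List.slice_toNat data ha hb]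
    have hdrop : data.drop a.toNat = data[a.toNat] :: data.drop (a.toNat + 1) :=
      List.drop_eq_getElem_cons halen
    have htk : b.toNat - a.toNat = n + 1 := by omega
    rw [hdrop, htk, List.take_succ_cons]
    simp only [List.foldl_cons]
    have hget : PySem.List.pyGetD data a [] = data[a.toNat] :=
      PySem.List.pyGetD_eq_getElem data [] ha (by omega)
    rw [if_pos (by omega), hget]
    have := ih (a + 1) b (pvInnerA data[a.toNat] 0 st) (by omega) (by omega) hb hlen
    rw [this, PySem.List.slice_toNat data (by omega) hb]
    have : (a + 1).toNat = a.toNat + 1 := by omega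
    rw [this]
    have : b.toNat - (a.toNat + 1) = n := by omega
    rw [this]

-- ===== VERDICT (by name: the statement is the Claim_ definition above) =====
theorem detect_column_bounds_py_spec : Claim_equal_detect_column_bounds_py := by
  intro data start_row end_row _
  show detect_column_bounds_py data start_row end_row = detect_column_bounds_py_alt data start_row end_row
  unfold detect_column_bounds_py detect_column_bounds_py_alt
  by_cases hd : data = []
  · simp [hd]
  · rw [if_neg hd, if_neg hd]
    by_cases hg : (start_row < 0 || end_row ≥ (data.length : Int) || start_row > end_row) = true
    · rw [if_pos hg, if_pos hg]
    · rw [if_neg hg, if_neg hg]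
      simp only [Bool.or_eq_true, decide_eq_true_eq, not_or] at hg
      obtain ⟨⟨h1, h2⟩, h3⟩ := hg
      have hB : (PySem.List.slice data (some start_row) (some (end_row + 1))).foldl
          pvRowStep ((none : Option Int), (-1 : Int)) =
          (PySem.List.slice data (some start_row) (some (end_row + 1))).foldl
          (fun st row => pvInnerA row 0 st) ((none : Option Int), (-1 : Int)) := by
        congr 1
        funext st row
        exact pvRowStep_eq_innerA st row
      rw [hB, ← pv_outer data (end_row + 1 - start_row).toNat start_row (end_row + 1) _
        rfl (by omega) (by omega) (by omega)]
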